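-- pv_equiv track=rewrite | github.com/Edrianto/Dialogue_to_JSON | dialogue_to_json.py | get_json_keys
-- ===== SOURCE A (Python) =====
-- def get_json_keys(dialogue):
--     keys = []
--     clean_keys = []
--
--     for line in dialogue:
--         if line == "\\":
--             return clean_keys, keys
--
--         keys.append(line)
--
--         if "[" in line:
--             clean_keys.append(line[0:line.index("[")])
--             continue
--         if "{" in line:
--             clean_keys.append(line[0:line.index("{")])
--             continue
--
--         clean_keys.append(line)
-- ===== SOURCE B (Python) =====
-- def get_json_keys(dialogue):
--     lines = list(dialogue)
--     i = lines.index("\\")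
--     keys = lines[:i]
--     clean_keys = [line[:line.index("[")] if "[" in line
--                   else line[:line.index("{")] if "{" in line
--                   else line
--                   for line in keys]
--     return clean_keys, keys
-- ===== Notes on version B (the rewrite author's own statement) =====
-- stated objective: simpler
-- what changed: A's single interleaved early-returning loop that grows two accumulators is replaced by a locate-then-map decomposition: find the index of the terminator line, take the prefix as keys, and build clean_keys with one comprehension.
-- outside the precondition, e.g. on get_json_keys(['a']): A returns None, B raises ValueError
import Mathlib
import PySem

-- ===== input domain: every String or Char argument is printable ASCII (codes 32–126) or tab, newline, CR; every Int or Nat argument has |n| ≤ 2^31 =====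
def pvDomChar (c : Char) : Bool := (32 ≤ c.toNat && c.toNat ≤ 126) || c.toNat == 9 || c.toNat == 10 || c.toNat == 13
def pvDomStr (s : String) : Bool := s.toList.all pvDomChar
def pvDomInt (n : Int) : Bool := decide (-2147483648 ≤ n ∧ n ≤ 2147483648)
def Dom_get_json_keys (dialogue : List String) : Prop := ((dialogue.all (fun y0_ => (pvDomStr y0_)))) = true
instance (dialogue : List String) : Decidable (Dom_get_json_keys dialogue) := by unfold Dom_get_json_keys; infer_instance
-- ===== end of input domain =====

-- B replaces A's interleaved early-returning accumulator loop by a simpler locate-terminator-then-map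
-- decomposition; Pre_ excludes inputs without a "\" line, where A returns None (not a pair) and B raises.


-- ===== PORT A =====
-- the loop of A: carries keys and clean_keys, early-returns at the "\" line;
-- falling off the loop is Python's implicit `return None`, excluded by Pre_ (junk value ([], []))
def get_json_keys_loopA (keys clean : List String) : List String → List String × List String
  | [] => ([], [])
  | line :: rest =>
    if line = "\\" then (clean, keys)
    else if PySem.Str.isIn "[" line then
      get_json_keys_loopA (keys ++ [line])
        (clean ++ [PySem.Str.slice line (some 0) (some (PySem.Str.find line "["))]) rest
    else if PySem.Str.isIn "{" line then
      get_json_keys_loopA (keys ++ [line])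
        (clean ++ [PySem.Str.slice line (some 0) (some (PySem.Str.find line "{"))]) rest
    else
      get_json_keys_loopA (keys ++ [line]) (clean ++ [line]) rest

def get_json_keys (dialogue : List String) : List String × List String :=
  get_json_keys_loopA [] [] dialogue

-- ===== PORT B =====
-- the comprehension body of B: truncate at '[' if present, else at '{' if present, else keep the line
def get_json_keys_cleanB (line : String) : String :=
  if PySem.Str.isIn "[" line then PySem.Str.slice line none (some (PySem.Str.find line "["))
  else if PySem.Str.isIn "{" line then PySem.Str.slice line none (some (PySem.Str.find line "{"))
  else line

def get_json_keys_alt (dialogue : List String) : List String × List String :=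
  match PySem.List.index? dialogue "\\" with
  | none => ([], [])   -- lines.index raises ValueError here; excluded by Pre_
  | some i =>
    let keys := PySem.List.slice dialogue none (some (i : Int))
    let clean_keys := keys.map get_json_keys_cleanB
    (clean_keys, keys)

-- ===== PRECONDITION & SPEC =====
-- Pre_ excludes inputs with no "\" line: there A falls off its loop and returns None, not a pair,
-- and B's lines.index("\") raises ValueError.
def Pre_get_json_keys (dialogue : List String) : Prop := "\\" ∈ dialogue
instance (dialogue : List String) : Decidable (Pre_get_json_keys dialogue) := by unfold Pre_get_json_keys; infer_instance
def pvWitness_get_json_keys : List String := ["a[1]", "b{2}", "c", "\\", "ignored"]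

def Spec_get_json_keys (dialogue : List String) (out : List String × List String) : Prop := out = get_json_keys_alt dialogue
instance (dialogue : List String) (out : List String × List String) : Decidable (Spec_get_json_keys dialogue out) := by unfold Spec_get_json_keys; infer_instance

-- ===== CLAIM (what is proved, stated in full; the proofs are below) =====
def Claim_equal_get_json_keys : Prop := ∀ (dialogue : List String), Dom_get_json_keys dialogue → Pre_get_json_keys dialogue → Spec_get_json_keys dialogue (get_json_keys dialogue)

-- ===== LEMMAS AND PROOFS =====

-- A's loop, when the terminator is present, returns the accumulators extended by the prefix
-- before the first "\" (as takeWhile) and its cleaned image.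
theorem get_json_keys_loopA_eq (l : List String) :
    ∀ keys clean, "\\" ∈ l →
      get_json_keys_loopA keys clean l =
        (clean ++ (l.takeWhile (fun s => s ≠ "\\")).map get_json_keys_cleanB,
         keys ++ l.takeWhile (fun s => s ≠ "\\")) := by
  induction l with
  | nil => intro _ _ h; cases h
  | cons line rest ih =>
    intro keys clean hmem
    by_cases hb : line = "\\"
    · subst hb
      simp [get_json_keys_loopA, List.takeWhile]
    · have hrest : "\\" ∈ rest := by
        rcases List.mem_cons.mp hmem with h | h
        · exact absurd h.symm hb
        · exact h
      have htw : (line :: rest).takeWhile (fun s => s ≠ "\\") =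
          line :: rest.takeWhile (fun s => s ≠ "\\") := by
        simp [List.takeWhile, hb]
      by_cases h1 : PySem.Str.isIn "[" line
      · simp only [get_json_keys_loopA, if_neg hb, ih _ _ hrest, htw,
          List.map_cons, get_json_keys_cleanB, h1]
        simp [PySem.Str.slice, PySem.List.slice_zero_start, List.append_assoc]
      · by_cases h2 : PySem.Str.isIn "{" line
        · simp only [get_json_keys_loopA, if_neg hb, ih _ _ hrest, htw,
            List.map_cons, get_json_keys_cleanB, h1, h2]
          simp [PySem.Str.slice, PySem.List.slice_zero_start, List.append_assoc]
        · simp only [get_json_keys_loopA, if_neg hb, ih _ _ hrest, htw,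
            List.map_cons, get_json_keys_cleanB, h1, h2]
          simp [List.append_assoc]

-- taking up to the first occurrence of v equals takeWhile (· ≠ v)
theorem takeWhile_ne_of_decomp {α : Type} [DecidableEq α] (pre suf : List α) (v : α)
    (hv : v ∉ pre) : (pre ++ v :: suf).takeWhile (fun s => s ≠ v) = pre := by
  induction pre with
  | nil => simp
  | cons x xs ih =>
    have hx : x ≠ v := fun h => hv (h ▸ List.mem_cons_self)
    have hxs : v ∉ xs := fun h => hv (List.mem_cons_of_mem _ h)
    simp only [List.cons_append, List.takeWhile_cons]
    simp [hx]
    simpa using ih hxs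

-- ===== VERDICT (by name: the statement is the Claim_ definition above) =====
theorem get_json_keys_spec : Claim_equal_get_json_keys := by
  intro dialogue _ hpre
  unfold Spec_get_json_keys get_json_keys get_json_keys_alt
  cases hidx : PySem.List.index? dialogue "\\" with
  | none =>
    exact absurd hpre ((PySem.List.index?_eq_none_iff _ _).mp hidx)
  | some k =>
    obtain ⟨pre, suf, hsplit, hlen, hnotin⟩ := (PySem.List.index?_eq_some_iff _ _ _).mp hidx
    have hslice : PySem.List.slice dialogue none (some (k : Int)) = dialogue.take k :=
      PySem.List.slice_to_natCast dialogue k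
    have htake : dialogue.take k = pre := by
      subst hsplit; subst hlen; simp
    have htw : dialogue.takeWhile (fun s => s ≠ "\\") = pre := by
      subst hsplit; exact takeWhile_ne_of_decomp pre suf _ hnotin
    rw [get_json_keys_loopA_eq dialogue [] [] hpre, htw]
    simp [hslice, htake]
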